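-- pv_equiv track=rewrite | github.com/cycxyit/storeroom | predictpro.py | markov_chain_prediction
-- ===== SOURCE A (Python) =====
-- def markov_chain_prediction(numbers):
--     if len(numbers) < 3:
--         return None
--     order = min(2, len(numbers) - 1)
--     while order >= 1:
--         state = tuple(numbers[-order:])
--         next_vals = []
--         for i in range(len(numbers) - order):
--             if tuple(numbers[i:i + order]) == state:
--                 if i + order < len(numbers):
--                     next_vals.append(numbers[i + order])
--         if next_vals:
--             from collections import Counter
--             pred = Counter(next_vals).most_common(1)[0][0]
--             return "大" if pred >= 5 else "小"
--         order -= 1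
--     return None
-- ===== SOURCE B (Python) =====
-- def markov_chain_prediction(numbers):
--     if len(numbers) < 3:
--         return None
--     for order in (2, 1):
--         # table-first: one pass building state -> list of successors
--         pairs = [(tuple(numbers[i:i + order]), numbers[i + order])
--                  for i in range(len(numbers) - order)]
--         table = {}
--         for s, v in pairs:
--             table.setdefault(s, []).append(v)
--         succ = table.get(tuple(numbers[-order:]), [])
--         if succ:
--             counts = {}
--             for v in succ:
--                 counts[v] = counts.get(v, 0) + 1
--             best = max(counts, key=lambda k: counts[k])
--             return "大" if best >= 5 else "小"
--     return None
-- ===== Notes on version B (the rewrite author's own statement) =====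
-- stated objective: alternative
-- what changed: B builds a state-to-successors dict in one pass per order and looks up the last state, then takes the argmax of an explicit counts dict, instead of A's per-order rescan of the sequence comparing every window to the state and Counter.most_common.
import Mathlib
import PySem

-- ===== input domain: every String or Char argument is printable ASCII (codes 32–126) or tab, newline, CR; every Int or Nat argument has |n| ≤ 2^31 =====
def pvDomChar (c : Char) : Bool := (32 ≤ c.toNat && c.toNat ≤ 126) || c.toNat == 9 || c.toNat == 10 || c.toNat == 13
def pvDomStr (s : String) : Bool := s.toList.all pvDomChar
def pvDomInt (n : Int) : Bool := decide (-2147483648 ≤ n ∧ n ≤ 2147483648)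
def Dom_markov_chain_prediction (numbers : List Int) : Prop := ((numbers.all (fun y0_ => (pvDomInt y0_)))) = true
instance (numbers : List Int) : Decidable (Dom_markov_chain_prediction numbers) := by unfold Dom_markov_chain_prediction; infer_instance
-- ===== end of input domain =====

-- B builds a state→successors table in one pass and takes the dict-argmax instead of
-- re-scanning the sequence per order and calling Counter.most_common (objective: alternative).

-- ===== PORT A =====
-- the while loop, with the fuel = the current value of `order` (it decreases by 1 each pass)
def pvAWhile (numbers : List Int) : Nat → Option String
  | 0 => none
  | o + 1 =>
    let order : Int := (o : Int) + 1
    let state := PySem.List.slice numbers (some (-order)) none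
    let nextVals :=
      (PySem.List.pyRange 0 ((numbers.length : Int) - order) 1).foldl
        (fun acc i =>
          if PySem.List.slice numbers (some i) (some (i + order)) == state then
            if i + order < (numbers.length : Int) then
              acc ++ [PySem.List.pyGetD numbers (i + order) 0]
            else acc
          else acc) []
    if nextVals.isEmpty then pvAWhile numbers o
    else
      -- Counter(next_vals).most_common(1)[0][0]: the first item of maximal count
      match PySem.List.max? (PySem.Dict.counter nextVals).items (fun p => p.2) with
      | some p => some (if p.1 ≥ 5 then "大" else "小")
      | none => none

def markov_chain_prediction (numbers : List Int) : Option String :=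
  if numbers.length < 3 then none
  else pvAWhile numbers (min 2 (numbers.length - 1))

-- ===== PORT B =====
def pvBTry (numbers : List Int) (order : Nat) : Option String :=
  let pairs :=
    (PySem.List.pyRange 0 ((numbers.length : Int) - (order : Int)) 1).map
      (fun i => (PySem.List.slice numbers (some i) (some (i + (order : Int))),
                 PySem.List.pyGetD numbers (i + (order : Int)) 0))
  let table := pairs.foldl (fun d p => d.modify p.1 [] (· ++ [p.2])) PySem.Dict.empty
  let succ := table.getD (PySem.List.slice numbers (some (-(order : Int))) none) []
  if succ.isEmpty then none
  else
    let counts := succ.foldl (fun d v => d.modify v 0 (· + 1)) (PySem.Dict.empty : PySem.Dict Int Int)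
    match PySem.List.max? counts.keys (fun k => counts.getD k 0) with
    | some best => some (if best ≥ 5 then "大" else "小")
    | none => none

def markov_chain_prediction_alt (numbers : List Int) : Option String :=
  if numbers.length < 3 then none
  else
    match pvBTry numbers 2 with
    | some r => some r
    | none => pvBTry numbers 1

-- ===== PRECONDITION & SPEC =====
def Spec_markov_chain_prediction (numbers : List Int) (out : Option String) : Prop := out = markov_chain_prediction_alt numbers
instance (numbers : List Int) (out : Option String) : Decidable (Spec_markov_chain_prediction numbers out) := by unfold Spec_markov_chain_prediction; infer_instance

-- ===== CLAIM (what is proved, stated in full; the proofs are below) =====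
def Claim_equal_markov_chain_prediction : Prop := ∀ (numbers : List Int), Dom_markov_chain_prediction numbers → Spec_markov_chain_prediction numbers (markov_chain_prediction numbers)

-- ===== LEMMAS AND PROOFS =====

theorem pv_max_aux {α : Type} (c : α → Int) (S : List α) : ∀ (acc : Option α),
    List.foldl (fun a (x : α × Int) => match a with
        | none => some x
        | some m => if m.2 < x.2 then some x else some m)
      (acc.map (fun k => (k, c k))) (S.map (fun k => (k, c k)))
    = (List.foldl (fun a x => match a with
        | none => some x
        | some m => if c m < c x then some x else some m) acc S).map (fun k => (k, c k)) := by
  induction S with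
  | nil => intro acc; rfl
  | cons x t ih =>
    intro acc
    simp only [List.map_cons, List.foldl_cons]
    have hs : (match Option.map (fun k => (k, c k)) acc with
        | none => some (x, c x)
        | some m => if m.2 < c x then some (x, c x) else some m)
      = Option.map (fun k => (k, c k)) (match acc with
        | none => some x
        | some m => if c m < c x then some x else some m) := by
      cases acc with
      | none => rfl
      | some m => simp only [Option.map_some]; split_ifs <;> rfl
    rw [hs]; exact ih _

theorem pv_max_map {α : Type} [BEq α] [LawfulBEq α] (S : List α) (c : α → Int) :
    PySem.List.max? (S.map (fun k => (k, c k))) (fun p => p.2)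
      = (PySem.List.max? S c).map (fun k => (k, c k)) := by
  have h := pv_max_aux c S none
  simp only [Option.map_none] at h
  simp only [PySem.List.max?]
  convert h using 2
  funext a x; cases a <;> rfl

theorem pv_succ_eq' (numbers : List Int) (o : Nat) :
    (((PySem.List.pyRange 0 ((numbers.length : Int) - ((o : Int) + 1)) 1).map
        (fun i => (PySem.List.slice numbers (some i) (some (i + ((o : Int) + 1))),
                   PySem.List.pyGetD numbers (i + ((o : Int) + 1)) 0))).foldl
        (fun d p => d.modify p.1 [] (· ++ [p.2])) PySem.Dict.empty).getD
        (PySem.List.slice numbers (some (-((o : Int) + 1))) none) []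
    =
    (PySem.List.pyRange 0 ((numbers.length : Int) - ((o : Int) + 1)) 1).foldl
      (fun acc i =>
        if PySem.List.slice numbers (some i) (some (i + ((o : Int) + 1)))
            == PySem.List.slice numbers (some (-((o : Int) + 1))) none then
          if i + ((o : Int) + 1) < (numbers.length : Int) then
            acc ++ [PySem.List.pyGetD numbers (i + ((o : Int) + 1)) 0]
          else acc
        else acc) [] := by
  have hcong := PySem.List.foldl_congr_mem
      (PySem.List.pyRange 0 ((numbers.length : Int) - ((o : Int) + 1)) 1)
      (fun acc i =>
        if PySem.List.slice numbers (some i) (some (i + ((o : Int) + 1)))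
            == PySem.List.slice numbers (some (-((o : Int) + 1))) none then
          if i + ((o : Int) + 1) < (numbers.length : Int) then
            acc ++ [PySem.List.pyGetD numbers (i + ((o : Int) + 1)) 0]
          else acc
        else acc)
      (fun acc i =>
        if (PySem.List.slice numbers (some i) (some (i + ((o : Int) + 1)))
            == PySem.List.slice numbers (some (-((o : Int) + 1))) none) = true then
          acc ++ [PySem.List.pyGetD numbers (i + ((o : Int) + 1)) 0]
        else acc)
      ([] : List Int)
      (by
        intro acc i hi
        have hm := (PySem.List.mem_pyRange_one).mp hi
        have hlt : i + ((o : Int) + 1) < (numbers.length : Int) := by omega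
        beta_reduce
        rw [if_pos hlt])
  rw [hcong, PySem.List.foldl_append_if, PySem.Dict.getD_foldl_modify_append, List.filter_map]
  simp [Function.comp_def, PySem.Dict.getD_empty]

theorem pv_btry_eq (numbers : List Int) (o : Nat) :
    pvBTry numbers (o + 1)
      = (if ((PySem.List.pyRange 0 ((numbers.length : Int) - ((o : Int) + 1)) 1).foldl
              (fun acc i =>
                if PySem.List.slice numbers (some i) (some (i + ((o : Int) + 1)))
                    == PySem.List.slice numbers (some (-((o : Int) + 1))) none then
                  if i + ((o : Int) + 1) < (numbers.length : Int) then
                    acc ++ [PySem.List.pyGetD numbers (i + ((o : Int) + 1)) 0]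
                  else acc
                else acc) []).isEmpty then none
         else
           match PySem.List.max? (PySem.Dict.counter
               ((PySem.List.pyRange 0 ((numbers.length : Int) - ((o : Int) + 1)) 1).foldl
                 (fun acc i =>
                   if PySem.List.slice numbers (some i) (some (i + ((o : Int) + 1)))
                       == PySem.List.slice numbers (some (-((o : Int) + 1))) none then
                     if i + ((o : Int) + 1) < (numbers.length : Int) then
                       acc ++ [PySem.List.pyGetD numbers (i + ((o : Int) + 1)) 0]
                     else acc
                   else acc) [])).items (fun p => p.2) with
           | some p => some (if p.1 ≥ 5 then "大" else "小")
           | none => none) := by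
  have hcast : ((o + 1 : Nat) : Int) = (o : Int) + 1 := by push_cast; ring
  simp only [pvBTry, hcast]
  rw [pv_succ_eq' numbers o]
  set nv := (PySem.List.pyRange 0 ((numbers.length : Int) - ((o : Int) + 1)) 1).foldl
      (fun acc i =>
        if PySem.List.slice numbers (some i) (some (i + ((o : Int) + 1)))
            == PySem.List.slice numbers (some (-((o : Int) + 1))) none then
          if i + ((o : Int) + 1) < (numbers.length : Int) then
            acc ++ [PySem.List.pyGetD numbers (i + ((o : Int) + 1)) 0]
          else acc
        else acc) [] with hnv
  by_cases he : nv.isEmpty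
  · simp [he]
  · simp only [he, if_false, Bool.false_eq_true]
    have hcounter : nv.foldl (fun d v => d.modify v 0 (· + 1)) (PySem.Dict.empty : PySem.Dict Int Int)
        = PySem.Dict.counter nv := rfl
    simp only [hcounter]
    rw [PySem.Dict.keys_counter]
    have hkey : (fun k => (PySem.Dict.counter nv).getD k 0)
        = (fun k => ((nv.count k : Nat) : Int)) := by
      funext k; exact PySem.Dict.getD_counter nv k
    rw [hkey, PySem.Dict.items_counter, pv_max_map]
    cases hmax : PySem.List.max? (PySem.Set.ofList nv) (fun k => ((nv.count k : Nat) : Int)) with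
    | none => simp
    | some k => simp

theorem pv_step (numbers : List Int) (o : Nat) :
    pvAWhile numbers (o + 1)
      = match pvBTry numbers (o + 1) with
        | some r => some r
        | none => pvAWhile numbers o := by
  conv_lhs => rw [pvAWhile]
  rw [pv_btry_eq]
  set nv := (PySem.List.pyRange 0 ((numbers.length : Int) - ((o : Int) + 1)) 1).foldl
      (fun acc i =>
        if PySem.List.slice numbers (some i) (some (i + ((o : Int) + 1)))
            == PySem.List.slice numbers (some (-((o : Int) + 1))) none then
          if i + ((o : Int) + 1) < (numbers.length : Int) then
            acc ++ [PySem.List.pyGetD numbers (i + ((o : Int) + 1)) 0]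
          else acc
        else acc) [] with hnv
  by_cases he : nv.isEmpty
  · simp [he]
  · simp only [he, if_false, Bool.false_eq_true]
    have hne : (PySem.Dict.counter nv).items ≠ [] := by
      rw [PySem.Dict.items_counter]
      intro h0
      rcases List.exists_mem_of_ne_nil nv (by simpa [List.isEmpty_iff] using he) with ⟨x, hx⟩
      have hx2 := (PySem.Set.mem_ofList nv x).mpr hx
      rcases List.map_eq_nil_iff.mp h0 with h1
      simp [h1] at hx2
    cases hmax : PySem.List.max? (PySem.Dict.counter nv).items (fun p => p.2) with
    | none => exact absurd ((PySem.List.max?_eq_none_iff _ _).mp hmax) hne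
    | some k => simp

-- ===== VERDICT (by name: the statement is the Claim_ definition above) =====
theorem markov_chain_prediction_spec : Claim_equal_markov_chain_prediction := by
  intro numbers _
  unfold Spec_markov_chain_prediction markov_chain_prediction markov_chain_prediction_alt
  by_cases h : numbers.length < 3
  · simp [h]
  · have hmin : min 2 (numbers.length - 1) = 2 := by omega
    simp only [h, if_false, hmin]
    rw [pv_step numbers 1, pv_step numbers 0]
    rcases pvBTry numbers 2 with _ | r
    · rcases pvBTry numbers 1 with _ | r <;> simp [pvAWhile]
    · simp
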